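-- pv_equiv track=rewrite | github.com/Junimpsj/calculadora_IPV6_redes_I | calculator.py | encontrar_sequencia_zeros_rightmost
-- ===== SOURCE A (Python) =====
-- def encontrar_sequencia_zeros_rightmost(grupos):
--     """
--     No rightmost quando há empate, escolhe a sequência mais à direita.
--     """
--     max_inicio = -1
--     max_tamanho = 0
--
--     #Procura todas as sequências de zeros
--     i = 0
--     while i < len(grupos):
--         if grupos[i] == '0':
--             inicio = i
--             tamanho = 0
--             while i < len(grupos) and grupos[i] == '0':
--                 tamanho += 1
--                 i += 1
--
--             if tamanho >= max_tamanho and tamanho >= 2: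
--                 max_inicio = inicio
--                 max_tamanho = tamanho
--         else:
--             i += 1
--
--     return max_inicio, max_tamanho
-- ===== SOURCE B (Python) =====
-- def encontrar_sequencia_zeros_rightmost(grupos):
--     # Two phases: collect all maximal zero-runs as (inicio, tamanho), then pick
--     # the best with max over the key (tamanho, inicio).
--     runs = []
--     start = None
--     for idx, g in enumerate(grupos):
--         if g == '0':
--             if start is None:
--                 start = idx
--         else:
--             if start is not None:
--                 runs.append((start, idx - start))
--                 start = None
--     if start is not None:
--         runs.append((start, len(grupos) - start))
--     runs = [r for r in runs if r[1] >= 2]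
--     if not runs:
--         return (-1, 0)
--     return max(runs, key=lambda r: (r[1], r[0]))
-- ===== Notes on version B (the rewrite author's own statement) =====
-- stated objective: alternative
-- what changed: Replaces A's single index-walking while-loop with nested inner while and inline running max by a two-phase decomposition: one enumerate pass collects all maximal zero-runs as (inicio, tamanho) pairs, then max over the key (tamanho, inicio) selects the longest, rightmost-on-tie run.
import Mathlib
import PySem

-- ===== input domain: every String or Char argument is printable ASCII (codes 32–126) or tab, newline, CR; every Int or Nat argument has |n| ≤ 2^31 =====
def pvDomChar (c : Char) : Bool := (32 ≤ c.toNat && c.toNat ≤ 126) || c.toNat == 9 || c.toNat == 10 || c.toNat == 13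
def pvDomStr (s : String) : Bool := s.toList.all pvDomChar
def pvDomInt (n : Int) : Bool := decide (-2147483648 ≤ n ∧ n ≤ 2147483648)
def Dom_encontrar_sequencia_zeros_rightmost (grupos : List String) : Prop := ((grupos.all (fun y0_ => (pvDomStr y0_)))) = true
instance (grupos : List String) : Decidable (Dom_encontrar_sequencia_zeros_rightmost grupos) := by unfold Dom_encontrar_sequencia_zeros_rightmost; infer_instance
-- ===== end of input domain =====

-- B separates run-collection (one enumerate pass with a pending-start state) from
-- best-run selection (max over the key (tamanho, inicio)); same cost, clearer decomposition.

-- ===== PORT A =====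
-- inner while loop of A: counts the leading '0' groups, returns (tamanho, rest)
def innerA : List String → Nat × List String
  | [] => (0, [])
  | g :: t => if g == "0" then ((innerA t).1 + 1, (innerA t).2) else (0, g :: t)

-- termination fact for the outer while loop (cited by decreasing_by)
theorem innerA_len_le : ∀ l : List String, (innerA l).2.length ≤ l.length := by
  intro l
  induction l with
  | nil => simp [innerA]
  | cons g t ih =>
    by_cases h : g == "0" <;> simp [innerA, h] <;> omega

theorem innerA_len_lt (g : String) (t : List String) (h : (g == "0") = true) :
    (innerA (g :: t)).2.length < (g :: t).length := by
  have := innerA_len_le t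
  simp [innerA, h]
  omega

-- outer while loop of A; state (i, max_inicio, max_tamanho)
def loopA (rest : List String) (i : Nat) (maxI maxT : Int) : Int × Int :=
  match rest with
  | [] => (maxI, maxT)
  | g :: t =>
    if h : g == "0" then
      let tamanho := (innerA (g :: t)).1
      if (tamanho : Int) ≥ maxT ∧ (tamanho : Int) ≥ 2 then
        loopA (innerA (g :: t)).2 (i + tamanho) (i : Int) (tamanho : Int)
      else
        loopA (innerA (g :: t)).2 (i + tamanho) maxI maxT
    else
      loopA t (i + 1) maxI maxT
termination_by rest.length
decreasing_by
  · exact innerA_len_lt g t h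
  · exact innerA_len_lt g t h
  · simp

def encontrar_sequencia_zeros_rightmost (grupos : List String) : Int × Int :=
  loopA grupos 0 (-1) 0

-- ===== PORT B =====
-- enumerate(grupos)
def pyEnum : Nat → List String → List (Nat × String)
  | _, [] => []
  | i, x :: t => (i, x) :: pyEnum (i + 1) t

-- the for-loop of B: state (runs, start)
def bLoop : List (Nat × String) → List (Int × Int) → Option Int → List (Int × Int) × Option Int
  | [], runs, start => (runs, start)
  | (idx, g) :: rest, runs, start =>
    if g == "0" then
      bLoop rest runs (match start with | none => some (idx : Int) | some s => some s)
    else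
      match start with
      | none => bLoop rest runs none
      | some s => bLoop rest (runs ++ [(s, (idx : Int) - s)]) none

def encontrar_sequencia_zeros_rightmost_alt (grupos : List String) : Int × Int :=
  let p := bLoop (pyEnum 0 grupos) [] none
  let runs0 := p.1 ++ (match p.2 with | some s => [(s, (grupos.length : Int) - s)] | none => [])
  let runs := runs0.filter (fun r => decide (2 ≤ r.2))
  match runs with
  | [] => (-1, 0)
  | h :: t => t.foldl (fun best r => if r.2 > best.2 ∨ (r.2 = best.2 ∧ r.1 > best.1) then r else best) h

-- ===== PRECONDITION & SPEC =====
def Spec_encontrar_sequencia_zeros_rightmost (grupos : List String) (out : Int × Int) : Prop := out = encontrar_sequencia_zeros_rightmost_alt grupos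
instance (grupos : List String) (out : Int × Int) : Decidable (Spec_encontrar_sequencia_zeros_rightmost grupos out) := by unfold Spec_encontrar_sequencia_zeros_rightmost; infer_instance

-- ===== CLAIM (what is proved, stated in full; the proofs are below) =====
def Claim_equal_encontrar_sequencia_zeros_rightmost : Prop := ∀ (grupos : List String), Dom_encontrar_sequencia_zeros_rightmost grupos → Spec_encontrar_sequencia_zeros_rightmost grupos (encontrar_sequencia_zeros_rightmost grupos)

-- ===== LEMMAS AND PROOFS =====

-- the list of maximal zero-runs (inicio, tamanho), in left-to-right order
def runsOf : List String → Nat → List (Int × Int)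
  | [], _ => []
  | g :: t, i =>
    if h : g == "0" then
      ((i : Int), ((innerA (g :: t)).1 : Int)) :: runsOf (innerA (g :: t)).2 (i + (innerA (g :: t)).1)
    else
      runsOf t (i + 1)
termination_by l _ => l.length
decreasing_by
  · exact innerA_len_lt g t h
  · simp

-- A's running-max update and B's max-by-key update
def updA (acc r : Int × Int) : Int × Int := if r.2 ≥ acc.2 ∧ r.2 ≥ 2 then r else acc
def maxUpd (best r : Int × Int) : Int × Int :=
  if r.2 > best.2 ∨ (r.2 = best.2 ∧ r.1 > best.1) then r else best

-- A's loop is a fold of updA over the runs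
theorem loopA_foldl : ∀ (n : Nat) (l : List String), l.length ≤ n →
    ∀ (i : Nat) (mI mT : Int),
    loopA l i mI mT = List.foldl updA (mI, mT) (runsOf l i) := by
  intro n
  induction n with
  | zero =>
    intro l hl i mI mT
    match l with
    | [] => simp [loopA, runsOf]
    | _ :: _ => simp at hl
  | succ n ih =>
    intro l hl i mI mT
    match l with
    | [] => simp [loopA, runsOf]
    | g :: t =>
      by_cases h : (g == "0") = true
      · have hlt := innerA_len_lt g t h
        have hrec : (innerA (g :: t)).2.length ≤ n := by
          simp at hlt hl; omega
        rw [loopA, runsOf]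
        simp only [h, dif_pos]
        rw [List.foldl_cons]
        have hupd : updA (mI, mT) ((i : Int), ((innerA (g :: t)).1 : Int)) =
            if ((innerA (g :: t)).1 : Int) ≥ mT ∧ ((innerA (g :: t)).1 : Int) ≥ 2
            then ((i : Int), ((innerA (g :: t)).1 : Int)) else (mI, mT) := rfl
        by_cases hc : ((innerA (g :: t)).1 : Int) ≥ mT ∧ ((innerA (g :: t)).1 : Int) ≥ 2
        · simp only [hc, if_pos, hupd]
          exact ih _ hrec _ _ _
        · simp only [hc, if_neg, hupd, if_false]
          exact ih _ hrec _ _ _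
      · rw [loopA, runsOf]
        simp only [h, dif_neg, Bool.false_eq_true, not_false_iff]
        exact ih t (by simp at hl ⊢; omega) (i + 1) mI mT

-- append the pending run at end-of-list, as B does after its loop
def finz (p : List (Int × Int) × Option Int) (N : Nat) : List (Int × Int) :=
  p.1 ++ (match p.2 with | some s => [(s, (N : Int) - s)] | none => [])

-- B's collection loop produces exactly the runs
theorem bLoop_char : ∀ (l : List String) (i : Nat) (runs : List (Int × Int)) (N : Nat),
    N = i + l.length →
    finz (bLoop (pyEnum i l) runs none) N = runs ++ runsOf l i
      ∧ ∀ s : Int, finz (bLoop (pyEnum i l) runs (some s)) N =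
        runs ++ ((s, ((i : Int) + ((innerA l).1 : Int)) - s) :: runsOf (innerA l).2 (i + (innerA l).1)) := by
  intro l
  induction l with
  | nil =>
    intro i runs N hN
    constructor
    · simp [pyEnum, bLoop, finz, runsOf]
    · intro s
      simp only [pyEnum, bLoop, finz, innerA, runsOf]
      simp at hN
      subst hN
      simp
  | cons g t ih =>
    intro i runs N hN
    have hN' : N = (i + 1) + t.length := by simp at hN; omega
    by_cases h : (g == "0") = true
    · constructor
      · rw [pyEnum, bLoop]
        simp only [h, if_pos]
        have := (ih (i + 1) runs N hN').2 (i : Int)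
        rw [this]
        rw [runsOf]
        simp only [h, dif_pos]
        have : (innerA (g :: t)).1 = (innerA t).1 + 1 := by simp [innerA, h]
        have h2 : (innerA (g :: t)).2 = (innerA t).2 := by simp [innerA, h]
        rw [this, h2]
        have hn : (i + 1) + (innerA t).1 = i + ((innerA t).1 + 1) := by omega
        rw [hn]
        congr 2
        push_cast; ring
      · intro s
        rw [pyEnum, bLoop]
        simp only [h, if_pos]
        have := (ih (i + 1) runs N hN').2 s
        rw [this]
        have h1 : (innerA (g :: t)).1 = (innerA t).1 + 1 := by simp [innerA, h]
        have h2 : (innerA (g :: t)).2 = (innerA t).2 := by simp [innerA, h]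
        rw [h1, h2]
        have hn : (i + 1) + (innerA t).1 = i + ((innerA t).1 + 1) := by omega
        rw [hn]
        congr 2
        push_cast; ring
    · have h1 : (innerA (g :: t)).1 = 0 := by simp [innerA, h]
      have h2 : (innerA (g :: t)).2 = g :: t := by simp [innerA, h]
      constructor
      · rw [pyEnum, bLoop]
        simp only [h, if_neg, Bool.false_eq_true, not_false_iff]
        rw [(ih (i + 1) runs N hN').1, runsOf]
        simp [h]
      · intro s
        rw [pyEnum, bLoop]
        simp only [h, if_neg, Bool.false_eq_true, not_false_iff]
        rw [(ih (i + 1) (runs ++ [(s, (i : Int) - s)]) N hN').1]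
        rw [h1, h2]
        rw [runsOf]
        simp [h]

-- every run starts at ≥ i and has length ≥ 1
theorem runsOf_bounds : ∀ (n : Nat) (l : List String), l.length ≤ n → ∀ (i : Nat),
    ∀ r ∈ runsOf l i, (i : Int) ≤ r.1 ∧ 1 ≤ r.2 := by
  intro n
  induction n with
  | zero =>
    intro l hl i r hr
    match l with
    | [] => simp [runsOf] at hr
    | _ :: _ => simp at hl
  | succ n ih =>
    intro l hl i r hr
    match l with
    | [] => simp [runsOf] at hr
    | g :: t =>
      by_cases h : (g == "0") = true
      · rw [runsOf] at hr
        simp only [h, dif_pos, List.mem_cons] at hr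
        have h1 : (innerA (g :: t)).1 = (innerA t).1 + 1 := by simp [innerA, h]
        rcases hr with rfl | hr
        · constructor
          · simp
          · simp [h1]
        · have hlt := innerA_len_lt g t h
          have := ih (innerA (g :: t)).2 (by simp at hlt hl; omega) _ r hr
          constructor
          · have := this.1; push_cast at this ⊢; omega
          · exact this.2
      · rw [runsOf] at hr
        simp only [h, dif_neg, Bool.false_eq_true, not_false_iff] at hr
        have := ih t (by simp at hl; omega) (i + 1) r hr
        constructor
        · have := this.1; push_cast at this ⊢; omega
        · exact this.2

theorem runsOf_pairwise : ∀ (n : Nat) (l : List String), l.length ≤ n → ∀ (i : Nat),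
    (runsOf l i).Pairwise (fun a b => a.1 < b.1) := by
  intro n
  induction n with
  | zero =>
    intro l hl i
    match l with
    | [] => simp [runsOf]
    | _ :: _ => simp at hl
  | succ n ih =>
    intro l hl i
    match l with
    | [] => simp [runsOf]
    | g :: t =>
      by_cases h : (g == "0") = true
      · rw [runsOf]
        simp only [h, dif_pos]
        have hlt := innerA_len_lt g t h
        have hrec : (innerA (g :: t)).2.length ≤ n := by simp at hlt hl; omega
        have h1 : 1 ≤ (innerA (g :: t)).1 := by simp [innerA, h]
        constructor
        · intro r hr
          have := (runsOf_bounds n _ hrec _ r hr).1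
          push_cast at this ⊢
          omega
        · exact ih _ hrec _
      · rw [runsOf]
        simp only [h, dif_neg, Bool.false_eq_true, not_false_iff]
        exact ih t (by simp at hl; omega) (i + 1)

-- running max (A) agrees with max-by-key over the filtered runs (B), given the
-- accumulator is a genuine run lying left of everything still to come
theorem sel_main : ∀ (runs : List (Int × Int)) (mI mT : Int), 2 ≤ mT →
    (∀ r ∈ runs, mI < r.1 ∧ 1 ≤ r.2) → runs.Pairwise (fun a b => a.1 < b.1) →
    List.foldl updA (mI, mT) runs = List.foldl maxUpd (mI, mT) (runs.filter (fun r => decide (2 ≤ r.2))) := by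
  intro runs
  induction runs with
  | nil => intro mI mT _ _ _; simp
  | cons r rest ih =>
    intro mI mT hmT hmem hpw
    have hr := hmem r (by simp)
    have hpw' := hpw.of_cons
    have hlt := fun r' (hr' : r' ∈ rest) => List.rel_of_pairwise_cons hpw hr'
    by_cases h2 : 2 ≤ r.2
    · rw [List.filter_cons_of_pos (by simp [h2]), List.foldl_cons, List.foldl_cons]
      by_cases hge : r.2 ≥ mT
      · have e1 : updA (mI, mT) r = r := by
          simp [updA, hge, h2]
        have e2 : maxUpd (mI, mT) r = r := by
          rcases lt_or_eq_of_le hge with hgt | heq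
          · simp [maxUpd, hgt]
          · simp [maxUpd, heq.symm, hr.1]
        rw [e1, e2]
        have : (r.1, r.2) = r := rfl
        rw [← this]
        exact ih r.1 r.2 h2 (fun r' hr' => ⟨hlt r' hr', (hmem r' (by simp [hr'])).2⟩) hpw'
      · have e1 : updA (mI, mT) r = (mI, mT) := by simp [updA]; omega
        have e2 : maxUpd (mI, mT) r = (mI, mT) := by simp [maxUpd]; omega
        rw [e1, e2]
        exact ih mI mT hmT (fun r' hr' => hmem r' (by simp [hr'])) hpw'
    · rw [List.filter_cons_of_neg (by simp [h2]), List.foldl_cons]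
      have e1 : updA (mI, mT) r = (mI, mT) := by simp [updA]; omega
      rw [e1]
      exact ih mI mT hmT (fun r' hr' => hmem r' (by simp [hr'])) hpw.of_cons

theorem sel_init : ∀ (runs : List (Int × Int)),
    (∀ r ∈ runs, 0 ≤ r.1 ∧ 1 ≤ r.2) → runs.Pairwise (fun a b => a.1 < b.1) →
    List.foldl updA (-1, 0) runs =
      (match runs.filter (fun r => decide (2 ≤ r.2)) with
       | [] => ((-1 : Int), (0 : Int))
       | h :: t => List.foldl maxUpd h t) := by
  intro runs
  induction runs with
  | nil => intro _ _; simp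
  | cons r rest ih =>
    intro hmem hpw
    have hr := hmem r (by simp)
    by_cases h2 : 2 ≤ r.2
    · rw [List.filter_cons_of_pos (by simp [h2]), List.foldl_cons]
      have e1 : updA (-1, 0) r = r := by simp [updA]; omega
      rw [e1]
      have : (r.1, r.2) = r := rfl
      rw [← this]
      simp only []
      exact sel_main rest r.1 r.2 h2
        (fun r' hr' => ⟨List.rel_of_pairwise_cons hpw hr', (hmem r' (by simp [hr'])).2⟩)
        hpw.of_cons
    · rw [List.filter_cons_of_neg (by simp [h2]), List.foldl_cons]
      have e1 : updA (-1, 0) r = (-1, 0) := by simp [updA]; omega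
      rw [e1]
      exact ih (fun r' hr' => hmem r' (by simp [hr'])) hpw.of_cons

-- B computes the max-by-key over the filtered runs
theorem alt_eq (grupos : List String) :
    encontrar_sequencia_zeros_rightmost_alt grupos =
      (match (runsOf grupos 0).filter (fun r => decide (2 ≤ r.2)) with
       | [] => ((-1 : Int), (0 : Int))
       | h :: t => List.foldl maxUpd h t) := by
  unfold encontrar_sequencia_zeros_rightmost_alt
  have hfin : (bLoop (pyEnum 0 grupos) [] none).1 ++
      (match (bLoop (pyEnum 0 grupos) [] none).2 with
        | some s => [(s, (grupos.length : Int) - s)] | none => []) = runsOf grupos 0 := by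
    have := (bLoop_char grupos 0 [] grupos.length (by simp)).1
    simpa [finz] using this
  simp only [hfin]
  rfl

-- ===== VERDICT (by name: the statement is the Claim_ definition above) =====
theorem encontrar_sequencia_zeros_rightmost_spec : Claim_equal_encontrar_sequencia_zeros_rightmost := by
  intro grupos _
  unfold Spec_encontrar_sequencia_zeros_rightmost
  unfold encontrar_sequencia_zeros_rightmost
  rw [alt_eq grupos]
  rw [loopA_foldl grupos.length grupos (le_refl _) 0 (-1) 0]
  exact sel_init (runsOf grupos 0)
    (fun r hr => by
      have := runsOf_bounds grupos.length grupos (le_refl _) 0 r hr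
      exact ⟨by exact_mod_cast this.1, this.2⟩)
    (runsOf_pairwise grupos.length grupos (le_refl _) 0)
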